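-- pv_equiv track=rewrite | github.com/firedial/til | polyomino/qr/first.py | hasSquare
-- ===== SOURCE A (Python) =====
-- import itertools
--
-- SIZE = 21
--
-- def hasSquare(qr):
--     for (i, j) in itertools.product(range(SIZE - 2), range(SIZE - 2)):
--         for (p, q) in itertools.product(range(3), range(3)):
--             if qr[i + p][j + q] == 1:
--                 break
--         else:
--             return True
--
--     return False
-- ===== SOURCE B (Python) =====
-- SIZE = 21
--
-- def hasSquare(qr):
--     W = SIZE - 2
--     memo = {}
--     def rowOK(r, j):
--         # horizontal triple: cells qr[r][j..j+2] contain no 1 (memoized, so a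
--         # triple shared by up to three windows is scanned once)
--         if (r, j) not in memo:
--             memo[(r, j)] = all(qr[r][j + q] != 1 for q in range(3))
--         return memo[(r, j)]
--     return any(rowOK(i, j) and rowOK(i + 1, j) and rowOK(i + 2, j)
--                for i in range(W) for j in range(W))
-- ===== Notes on version B (the rewrite author's own statement) =====
-- stated objective: alternative
-- what changed: Decomposes the 3x3 window test separably: a memoized per-(row,column) horizontal 1-free-triple predicate, each window then a conjunction of three stacked triples, instead of A's 4-level nested rescan of all 9 cells per window.
import Mathlib
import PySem

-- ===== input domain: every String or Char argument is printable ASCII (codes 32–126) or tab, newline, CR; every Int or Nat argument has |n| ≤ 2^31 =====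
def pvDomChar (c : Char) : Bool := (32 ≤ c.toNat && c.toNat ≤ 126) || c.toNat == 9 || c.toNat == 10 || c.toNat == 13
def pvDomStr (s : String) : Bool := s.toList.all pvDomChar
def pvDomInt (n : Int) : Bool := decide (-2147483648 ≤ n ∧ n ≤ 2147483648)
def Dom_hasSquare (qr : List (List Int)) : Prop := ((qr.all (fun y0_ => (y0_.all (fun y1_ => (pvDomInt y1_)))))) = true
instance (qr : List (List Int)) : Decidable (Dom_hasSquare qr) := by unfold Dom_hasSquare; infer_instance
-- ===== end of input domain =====

-- B replaces A's 4-level per-window 9-cell rescan by a memoized horizontal-triple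
-- predicate; a window is a conjunction of three stacked triples (alternative decomposition).


-- ===== PORT A =====
-- qr[i+p][j+q]: total completion via default 0 — Pre_ admits exactly the inputs
-- on which Python never reads a missing cell before this scan terminates.
def hasSquare (qr : List (List Int)) : Bool :=
  (PySem.List.pyRange 0 19 1).any (fun i =>
    (PySem.List.pyRange 0 19 1).any (fun j =>
      (PySem.List.pyRange 0 3 1).all (fun p =>
        (PySem.List.pyRange 0 3 1).all (fun q =>
          !(PySem.List.pyGetD (PySem.List.pyGetD qr (i + p) []) (j + q) 0 == 1)))))

-- ===== PORT B =====
-- Source B's rowOK(r, j); its memo dict only caches this pure function (value-transparent),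
-- so the port computes the predicate directly. Same total completion as port A.
def pvRowOK (qr : List (List Int)) (r j : Int) : Bool :=
  (PySem.List.pyRange 0 3 1).all (fun q =>
    !(PySem.List.pyGetD (PySem.List.pyGetD qr r []) (j + q) 0 == 1))

def hasSquare_alt (qr : List (List Int)) : Bool :=
  (PySem.List.pyRange 0 19 1).any (fun i =>
    (PySem.List.pyRange 0 19 1).any (fun j =>
      pvRowOK qr i j && (pvRowOK qr (i + 1) j && pvRowOK qr (i + 2) j)))

-- ===== PRECONDITION & SPEC =====
-- qr[r][c] as Python sees it: none exactly where Python's double index would raise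
def pvCell (qr : List (List Int)) (r c : Nat) : Option Int :=
  (qr[r]?).bind (fun row => row[c]?)

-- window (i,j)'s row-major 3x3 scan hits a present cell equal to 1 with every
-- earlier-scanned cell present (the scan breaks before running off the grid)
def pvSafe (qr : List (List Int)) (i j : Nat) : Bool :=
  (List.range 3).any (fun p => (List.range 3).any (fun q =>
    (pvCell qr (i + p) (j + q) == some 1) &&
    ((List.range 3).all (fun p' => (List.range 3).all (fun q' =>
      !(decide (p' < p ∨ (p' = p ∧ q' < q))) || (pvCell qr (i + p') (j + q')).isSome)))))

-- all 9 cells of window (i,j) are present and none equals 1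
def pvCleanB (qr : List (List Int)) (i j : Nat) : Bool :=
  (List.range 3).all (fun p => (List.range 3).all (fun q =>
    (pvCell qr (i + p) (j + q)).isSome && !(pvCell qr (i + p) (j + q) == some 1)))

-- Pre_ is exactly where Python A (and B, which reads cells in the same order)
-- returns normally: either every window's scan breaks on a 1 before leaving the
-- grid (result False), or a fully-present 1-free window appears before any scan
-- can run off the grid (result True); outside Pre_ both raise IndexError.
def Pre_hasSquare (qr : List (List Int)) : Prop :=
  (∀ i < 19, ∀ j < 19, pvSafe qr i j = true) ∨
  (∃ i < 19, ∃ j < 19, pvCleanB qr i j = true ∧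
    ∀ i' < 19, ∀ j' < 19, (i' < i ∨ (i' = i ∧ j' < j)) → pvSafe qr i' j' = true)
instance (qr : List (List Int)) : Decidable (Pre_hasSquare qr) := by
  unfold Pre_hasSquare; infer_instance

def pvWitness_hasSquare : List (List Int) := [[0, 0, 0], [0, 0, 0], [0, 0, 0]]

def Spec_hasSquare (qr : List (List Int)) (out : Bool) : Prop := out = hasSquare_alt qr
instance (qr : List (List Int)) (out : Bool) : Decidable (Spec_hasSquare qr out) := by unfold Spec_hasSquare; infer_instance

-- ===== CLAIM (what is proved, stated in full; the proof is below) =====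
def Claim_equal_hasSquare : Prop := ∀ (qr : List (List Int)), Dom_hasSquare qr → Pre_hasSquare qr → Spec_hasSquare qr (hasSquare qr)

-- ===== LEMMAS AND PROOFS =====

-- A's 9-cell window scan is the conjunction of B's three stacked row triples
lemma pvWindow_eq (qr : List (List Int)) (i j : Int) :
    ((PySem.List.pyRange 0 3 1).all (fun p =>
      (PySem.List.pyRange 0 3 1).all (fun q =>
        !(PySem.List.pyGetD (PySem.List.pyGetD qr (i + p) []) (j + q) 0 == 1)))) =
    (pvRowOK qr i j && (pvRowOK qr (i + 1) j && pvRowOK qr (i + 2) j)) := by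
  have h3 : PySem.List.pyRange 0 3 1 = [0, 1, 2] := by decide
  simp only [pvRowOK, h3, List.all_cons, List.all_nil, Bool.and_true, add_zero]

-- ===== VERDICT (by name: the statement is the Claim_ definition above) =====
theorem hasSquare_spec : Claim_equal_hasSquare := by
  intro qr _ _
  unfold Spec_hasSquare hasSquare hasSquare_alt
  congr 1
  funext i
  congr 1
  funext j
  exact pvWindow_eq qr i j
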